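-- pv_equiv track=rewrite | github.com/FreeBeast05/TRAD | classifier.py | closed_concept
-- ===== SOURCE A (Python) =====
-- def closed_concept(attributes, context, num_attributes):
--     objects = []
--     attributes_closed = attributes[:]
--
--     for obj in context.keys():
--         flag = True
--         for attr in attributes:
--             if context[obj][attr] == 0:
--                 flag = False
--                 break
--         if flag:
--             objects.append(obj)
--     for attr in set(range(num_attributes))-set(attributes):
--         flag = True
--         for obj in objects:
--             if context[obj][attr] == 0:
--                 flag = False
--                 break
--         if flag:
--             attributes_closed.append(attr)
--
--     return objects[:], attributes_closed[:]
-- ===== SOURCE B (Python) =====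
-- def closed_concept(attributes, context, num_attributes):
--     required = set(attributes)
--     common = set(range(num_attributes))
--     objects = []
--     for obj, row in context.items():
--         if all(row[attr] != 0 for attr in attributes):
--             objects.append(obj)
--             common &= {a for a in range(num_attributes) if row.get(a, 0) != 0}
--     return objects, attributes[:] + [a for a in range(num_attributes)
--                                      if a in common and a not in required]
-- ===== Notes on version B (the rewrite author's own statement) =====
-- stated objective: alternative
-- what changed: A makes two passes (select objects, then for each candidate attribute rescan all selected objects); B makes one pass over the context, selecting each object and simultaneously intersecting its nonzero-attribute set into a running 'common' set, then emits the closure by filtering range(num_attributes) against that set.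
import Mathlib
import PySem

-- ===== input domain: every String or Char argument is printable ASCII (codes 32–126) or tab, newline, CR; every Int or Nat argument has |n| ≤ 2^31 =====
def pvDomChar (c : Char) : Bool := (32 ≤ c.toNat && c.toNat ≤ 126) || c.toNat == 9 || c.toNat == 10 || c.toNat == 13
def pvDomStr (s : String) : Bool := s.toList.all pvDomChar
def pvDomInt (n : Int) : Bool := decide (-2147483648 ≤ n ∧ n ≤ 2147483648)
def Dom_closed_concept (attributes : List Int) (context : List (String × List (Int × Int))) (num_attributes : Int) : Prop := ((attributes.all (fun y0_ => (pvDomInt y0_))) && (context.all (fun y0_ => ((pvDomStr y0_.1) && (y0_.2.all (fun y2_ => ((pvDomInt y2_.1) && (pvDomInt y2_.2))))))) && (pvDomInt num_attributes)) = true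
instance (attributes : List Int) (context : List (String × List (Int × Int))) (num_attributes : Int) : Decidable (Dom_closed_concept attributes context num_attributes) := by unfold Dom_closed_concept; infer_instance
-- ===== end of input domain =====

-- B replaces A's two passes (object selection, then a rescan of all selected objects for every
-- candidate attribute) by one pass over the context that keeps a running intersection of the
-- selected objects' nonzero-attribute sets; same return value on Pre_ (no argument is mutated).

-- ===== PORT A =====
-- context[obj][attr] as a total lookup: inside Pre_ every lookup A performs that this port answers
-- with the default 0 is behind a break A has already taken, so the default is never observable
-- (Python raises KeyError exactly on the inputs Pre_ excludes).
def pvCtxGet (context : List (String × List (Int × Int))) (obj : String) (attr : Int) : Int :=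
  (PySem.Dict.ofList ((PySem.Dict.ofList context).getD obj [])).getD attr 0

-- 'for attr in …: if context[obj][attr] == 0: flag = False; break' — once the flag is false it never
-- changes again, so the break is exact as a fold over the whole list (inside Pre_ no lookup raises).
-- Inside Pre_ every element of set(range(num_attributes))-set(attributes) is below the size of the
-- CPython hash table holding it, so CPython iterates it ascending — exactly the order of
-- PySem.Set.diff applied to the ascending pyRange.
def closed_concept (attributes : List Int) (context : List (String × List (Int × Int))) (num_attributes : Int) : List String × List Int :=
  let objects := (PySem.Dict.ofList context).keys.foldl (fun objects obj =>
      let flag := attributes.foldl (fun flag attr =>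
          if pvCtxGet context obj attr == 0 then false else flag) true
      if flag then objects ++ [obj] else objects) []
  let attributes_closed := (PySem.Set.diff (PySem.Set.ofList (PySem.List.pyRange 0 num_attributes 1))
      (PySem.Set.ofList attributes)).foldl (fun acc attr =>
      let flag := objects.foldl (fun flag obj =>
          if pvCtxGet context obj attr == 0 then false else flag) true
      if flag then acc ++ [attr] else acc) attributes
  (objects, attributes_closed)

-- ===== PORT B =====
-- Source B's row[attr] in the selection test raises KeyError on a missing key exactly where A's first
-- loop does (both short-circuit at the first zero); Pre_ admits only inputs where that never
-- happens, so the getD default 0 is unobservable there. row.get(a, 0) is getD a 0 exactly.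
def closed_concept_alt (attributes : List Int) (context : List (String × List (Int × Int))) (num_attributes : Int) : List String × List Int :=
  let required : PySem.Set Int := PySem.Set.ofList attributes
  let st := (PySem.Dict.ofList context).items.foldl
      (fun (st : List String × PySem.Set Int) p =>
        if attributes.all (fun attr => !((PySem.Dict.ofList p.2).getD attr 0 == 0)) then
          (st.1 ++ [p.1], PySem.Set.inter st.2
            (PySem.Set.ofList ((PySem.List.pyRange 0 num_attributes 1).filter
              (fun a => !((PySem.Dict.ofList p.2).getD a 0 == 0)))))
        else st)
      ([], PySem.Set.ofList (PySem.List.pyRange 0 num_attributes 1))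
  let extra := (PySem.List.pyRange 0 num_attributes 1).filter
      (fun a => PySem.Set.contains st.2 a && !PySem.Set.contains required a)
  (st.1, attributes ++ extra)

-- ===== PRECONDITION & SPEC =====
-- All Pre_ helpers are cheap, closed-form conditions on the input (none enumerates
-- range(num_attributes), so they decide fast even for huge num_attributes).

-- 0 ≤ a < n, i.e. a is a candidate attribute of range(n)
def pvInRange (n a : Int) : Bool := decide (0 ≤ a) && decide (a < n)

-- how many elements of range(n) are NOT in attributes (= the size of the set A's second loop iterates)
def pvFreeCount (attributes : List Int) (n : Int) : Nat :=
  n.toNat - (attributes.dedup.filter (fun a => pvInRange n a)).length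

-- largest a' ≤ a not in attributes, found by stepping down (at most |attributes|+1 steps suffice,
-- since each step down is blocked by a distinct member of attributes)
def pvMaxFree (attributes : List Int) : Nat → Int → Int
  | 0, a => a
  | f + 1, a => if attributes.contains a then pvMaxFree attributes f (a - 1) else a

-- final table size of a CPython set built by inserting d distinct small nonnegative ints in
-- ascending order (CPython's resize rule: grow to the next power of two above 4·used once
-- fill·5 ≥ (size-1)·3); iterated over the resize thresholds 5, 19, 77, … (they quadruple, so
-- fuel 40 covers every d ≤ 2^31); pure arithmetic on the count d, not a re-run of either port.
-- smallest power of two > m, starting from p (fuel-based so the kernel can reduce it)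
def pvPow2Above : Nat → Nat → Nat → Nat
  | 0, p, _ => p
  | f + 1, p, m => if m < p then p else pvPow2Above f (2 * p) m
def pvSetSizeGo : Nat → Nat → Nat → Nat → Nat
  | 0, s, _, _ => s
  | f + 1, s, t, d =>
    if d < t then s
    else pvSetSizeGo f (pvPow2Above 64 8 (4 * t)) ((3 * (pvPow2Above 64 8 (4 * t) - 1) + 4) / 5) d
def pvSetSize (d : Nat) : Nat := pvSetSizeGo 40 8 5 d

-- the scan of keys `as` over `row` stops (at the first key that is missing or maps to zero) only at
-- a key the row contains — i.e. the break fires on a genuine 0 before any KeyError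
def pvStopOk (as : List Int) (row : List (Int × Int)) : Bool :=
  (as.find? (fun a => (PySem.Dict.ofList row).getD a 0 == 0)).all
    (fun a => (PySem.Dict.ofList row).contains a)

-- the selection test of A's first loop, as a predicate on a context item
def pvSelected (attributes : List Int) (p : String × List (Int × Int)) : Bool :=
  attributes.all (fun attr => !((PySem.Dict.ofList p.2).getD attr 0 == 0))

-- the context items A's first loop selects
def pvSelItems (attributes : List Int) (context : List (String × List (Int × Int))) : List (String × List (Int × Int)) :=
  (PySem.Dict.ofList context).items.filter (pvSelected attributes)

-- the distinct keys occurring in the selected rows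
def pvRowKeys (sel : List (String × List (Int × Int))) : List Int :=
  (sel.flatMap (fun p => p.2.map (·.1))).dedup

-- A's second-loop column scan for candidate a over the selected items stops only at a genuine 0
def pvColOk (a : Int) (objs : List (String × List (Int × Int))) : Bool :=
  (objs.find? (fun p => (PySem.Dict.ofList p.2).getD a 0 == 0)).all
    (fun p => (PySem.Dict.ofList p.2).contains a)

-- Pre_ excludes exactly: (a) the inputs on which A raises KeyError — some row's scan of
-- `attributes`, or some candidate attribute's scan of the selected rows, reaches a missing key
-- before a zero entry (clauses 2 and 3: a candidate outside every selected row's keys stops at a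
-- missing key as soon as one row is selected, hence the cover count; candidates inside some
-- selected row's keys are checked one by one); and (b) the defensible set-iteration-order corner:
-- inputs where the largest candidate not in `attributes` is at least the final size of the CPython
-- hash table holding set(range(num_attributes))-set(attributes), where CPython's iteration order
-- of that set can deviate from ascending and any order is an accident of the hash layout
-- (everywhere else CPython iterates it ascending, the order both ports use).
def Pre_closed_concept (attributes : List Int) (context : List (String × List (Int × Int))) (num_attributes : Int) : Prop :=
  (pvFreeCount attributes num_attributes = 0 ∨
    pvMaxFree attributes (attributes.length + 1) (num_attributes - 1)
      < ((pvSetSize (pvFreeCount attributes num_attributes) : Nat) : Int)) ∧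
  (∀ p ∈ (PySem.Dict.ofList context).items, pvStopOk attributes p.2 = true) ∧
  (pvSelItems attributes context = [] ∨
    (((attributes ++ pvRowKeys (pvSelItems attributes context)).dedup.filter
        (fun a => pvInRange num_attributes a)).length = num_attributes.toNat ∧
     ∀ a ∈ pvRowKeys (pvSelItems attributes context),
       pvInRange num_attributes a = true → attributes.contains a = false →
         pvColOk a (pvSelItems attributes context) = true))

instance (attributes : List Int) (context : List (String × List (Int × Int))) (num_attributes : Int) : Decidable (Pre_closed_concept attributes context num_attributes) := by
  unfold Pre_closed_concept; infer_instance

def pvWitness_closed_concept : List Int × (List (String × List (Int × Int))) × Int :=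
  ([0], [("o", [(0, 1), (1, 1)])], 2)

def Spec_closed_concept (attributes : List Int) (context : List (String × List (Int × Int))) (num_attributes : Int) (out : List String × List Int) : Prop := out = closed_concept_alt attributes context num_attributes
instance (attributes : List Int) (context : List (String × List (Int × Int))) (num_attributes : Int) (out : List String × List Int) : Decidable (Spec_closed_concept attributes context num_attributes out) := by unfold Spec_closed_concept; infer_instance

-- ===== CLAIM (what is proved, stated in full; the proofs are below) =====
def Claim_equal_closed_concept : Prop := ∀ (attributes : List Int) (context : List (String × List (Int × Int))) (num_attributes : Int), Dom_closed_concept attributes context num_attributes → Pre_closed_concept attributes context num_attributes → Spec_closed_concept attributes context num_attributes (closed_concept attributes context num_attributes)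


-- ===== LEMMAS AND PROOFS =====

-- B's paired fold, split into its two components (sel = the selection test, nz = the row's set)
lemma pairfold_eq (sel : String × List (Int × Int) → Bool)
    (nz : List (Int × Int) → PySem.Set Int) (l : List (String × List (Int × Int)))
    (os : List String) (cm : PySem.Set Int) :
    l.foldl (fun (st : List String × PySem.Set Int) p =>
        if sel p then (st.1 ++ [p.1], PySem.Set.inter st.2 (nz p.2)) else st) (os, cm)
      = (os ++ (l.filter sel).map (·.1),
         (l.filter sel).foldl (fun c p => PySem.Set.inter c (nz p.2)) cm) := by
  induction l generalizing os cm with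
  | nil => simp
  | cons p t ih =>
    simp only [List.foldl_cons, List.filter_cons]
    by_cases h : sel p = true
    · simp only [h, if_true, List.map_cons]
      rw [ih]; simp
    · simp only [h, if_false, Bool.false_eq_true]
      rw [ih]

-- membership in the running intersection of the selected rows' sets
lemma mem_foldl_inter (nz : List (Int × Int) → PySem.Set Int)
    (l : List (String × List (Int × Int))) (cm : PySem.Set Int) (a : Int) :
    a ∈ l.foldl (fun c p => PySem.Set.inter c (nz p.2)) cm ↔
      a ∈ cm ∧ ∀ p ∈ l, a ∈ nz p.2 := by
  induction l generalizing cm with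
  | nil => simp
  | cons p t ih =>
    simp only [List.foldl_cons, ih, PySem.Set.mem_inter, List.mem_cons]
    constructor
    · rintro ⟨⟨h1, h2⟩, h3⟩
      refine ⟨h1, ?_⟩
      rintro q (rfl | hq)
      · exact h2
      · exact h3 q hq
    · rintro ⟨h1, h2⟩; exact ⟨⟨h1, h2 p (Or.inl rfl)⟩, fun q hq => h2 q (Or.inr hq)⟩

-- the row A looks up for a key of the context dict is the item's second component
lemma ctxGet_of_mem_items (context : List (String × List (Int × Int)))
    (p : String × List (Int × Int)) (hp : p ∈ (PySem.Dict.ofList context).items) (a : Int) :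
    pvCtxGet context p.1 a = (PySem.Dict.ofList p.2).getD a 0 := by
  unfold pvCtxGet
  rw [PySem.Dict.getD_of_mem_items _ hp (PySem.Dict.nodup_keys_ofList context)]

-- A's per-object flag equals B's selection test, for rows actually stored in the context
lemma flag_eq_sel (attributes : List Int) (context : List (String × List (Int × Int)))
    (p : String × List (Int × Int)) (hp : p ∈ (PySem.Dict.ofList context).items) :
    (!attributes.any fun attr => pvCtxGet context p.1 attr == 0)
      = attributes.all (fun attr => !((PySem.Dict.ofList p.2).getD attr 0 == 0)) := by
  rw [Bool.eq_iff_iff]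
  simp [List.all_eq_true, ctxGet_of_mem_items context p hp]

lemma diff_eq_filter (s t : PySem.Set Int) :
    PySem.Set.diff s t = s.filter (fun x => !t.contains x) := by
  simp [PySem.Set.diff]

-- ===== VERDICT (by name: the statement is the Claim_ definition above) =====
theorem closed_concept_spec : Claim_equal_closed_concept := by
  intro attributes context num_attributes _hDom _hPre
  unfold Spec_closed_concept
  unfold closed_concept closed_concept_alt
  simp only [PySem.List.foldl_if_false_eq, Bool.true_and, PySem.List.foldl_append_if_eq_filter,
    List.nil_append,
    pairfold_eq (fun p => attributes.all (fun attr => !((PySem.Dict.ofList p.2).getD attr 0 == 0)))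
      (fun row => PySem.Set.ofList ((PySem.List.pyRange 0 num_attributes 1).filter
        (fun a => !((PySem.Dict.ofList row).getD a 0 == 0))))]
  rw [show (PySem.Dict.ofList context).keys = (PySem.Dict.ofList context).items.map (·.1) from rfl]
  rw [List.filter_map]
  simp only [Function.comp_def]
  rw [List.filter_congr (fun p hp => flag_eq_sel attributes context p hp)]
  congr 1
  rw [diff_eq_filter, PySem.Set.ofList_eq_self_of_nodup _ (PySem.List.nodup_pyRange_one 0 num_attributes),
    List.filter_filter]
  congr 1
  refine List.filter_congr ?_
  intro a ha
  congr 1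
  have hany : ((List.filter (fun p => attributes.all (fun attr => !((PySem.Dict.ofList p.2).getD attr 0 == 0))) (PySem.Dict.ofList context).items).map (fun x => x.1)).any
      (fun o => pvCtxGet context o a == 0)
      = (List.filter (fun p => attributes.all (fun attr => !((PySem.Dict.ofList p.2).getD attr 0 == 0))) (PySem.Dict.ofList context).items).any
      (fun p => (PySem.Dict.ofList p.2).getD a 0 == 0) := by
    rw [List.any_map]
    exact PySem.List.any_congr_mem (fun p hp => by
      simp only [Function.comp_def]
      rw [ctxGet_of_mem_items context p (List.mem_of_mem_filter hp) a])
  rw [hany, Bool.eq_iff_iff, PySem.Set.contains_iff,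
    mem_foldl_inter (fun row => PySem.Set.ofList ((PySem.List.pyRange 0 num_attributes 1).filter
      (fun a => !((PySem.Dict.ofList row).getD a 0 == 0))))]
  simp [PySem.Set.mem_ofList, List.mem_filter, ha]
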